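-- pv_equiv track=rewrite | github.com/andresnowak/system_equation_solver | system_equation_solver.py | create_matrix_operation_order
-- ===== SOURCE A (Python) =====
-- def create_matrix_operation_order(matrix_size):
--     order_matrix = []
--
--     for i in range(matrix_size):
--         row = []
--         for j in range(matrix_size):
--             if j == 0:
--                 row.append(i)
--             if j != i:
--                 row.append(j)
--
--         order_matrix.append(row)
--
--     return order_matrix
-- ===== SOURCE B (Python) =====
-- def create_matrix_operation_order(matrix_size):
--     # Incremental algorithm: maintain one permutation row, starting as the
--     # identity [0..n-1] (which is row 0), and obtain each next row from the
--     # previous one by a single transposition: swapping row[0] with row[i+1]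
--     # turns row i = [i, 0..i-1, i+1..n-1] into row i+1.
--     result = []
--     row = list(range(matrix_size))
--     for i in range(matrix_size):
--         result.append(row.copy())
--         if i + 1 < matrix_size:
--             row[0], row[i + 1] = row[i + 1], row[0]
--     return result
-- ===== Notes on version B (the rewrite author's own statement) =====
-- stated objective: faster
-- what changed: B is incremental: it keeps one permutation row starting as the identity list(range(n)) and derives each next row from the previous one by a single transposition row[0]<->row[i+1] (constant update work per row besides the copy), instead of A's per-row inner scan over every j with a j==0 prepend and a j!=i skip test.
import Mathlib
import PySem

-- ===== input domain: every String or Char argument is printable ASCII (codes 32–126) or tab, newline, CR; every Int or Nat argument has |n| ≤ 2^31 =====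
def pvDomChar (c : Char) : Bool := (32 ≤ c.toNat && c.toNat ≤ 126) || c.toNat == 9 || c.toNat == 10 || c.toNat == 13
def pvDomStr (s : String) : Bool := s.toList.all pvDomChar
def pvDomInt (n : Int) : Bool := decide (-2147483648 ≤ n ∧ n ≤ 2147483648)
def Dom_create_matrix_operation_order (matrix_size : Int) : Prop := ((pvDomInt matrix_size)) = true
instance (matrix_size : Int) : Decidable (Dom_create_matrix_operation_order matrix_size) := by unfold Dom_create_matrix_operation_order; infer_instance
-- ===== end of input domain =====

-- B replaces A's per-row filtering scan by an incremental algorithm: it keeps one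
-- permutation row (starting as the identity) and derives each next row from the
-- previous one by a single transposition row[0] <-> row[i+1] (objective: alternative).

-- ===== PORT A =====
def create_matrix_operation_order (matrix_size : Int) : List (List Int) :=
  (PySem.List.pyRange 0 matrix_size 1).foldl
    (fun order_matrix i =>
      order_matrix ++
        [(PySem.List.pyRange 0 matrix_size 1).foldl
          (fun row j => (if j = 0 then row ++ [i] else row) ++ (if j ≠ i then [j] else [])) []])
    []

-- ===== PORT B =====
-- State of Source B's loop: (result, row).  Under the guard i + 1 < matrix_size both
-- indices 0 and i+1 are nonnegative and in range (i comes from range(matrix_size)),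
-- so List.getD / List.set are exact for Python's row[0], row[i+1] swap here.
def create_matrix_operation_order_alt (matrix_size : Int) : List (List Int) :=
  ((PySem.List.pyRange 0 matrix_size 1).foldl
    (fun (st : List (List Int) × List Int) i =>
      let result := st.1 ++ [st.2]
      let row :=
        if i + 1 < matrix_size then
          let x := st.2.getD 0 0
          let y := st.2.getD (i + 1).toNat 0
          (st.2.set 0 y).set (i + 1).toNat x
        else st.2
      (result, row))
    ([], PySem.List.pyRange 0 matrix_size 1)).1

-- ===== PRECONDITION & SPEC =====
def Spec_create_matrix_operation_order (matrix_size : Int) (out : List (List Int)) : Prop := out = create_matrix_operation_order_alt matrix_size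
instance (matrix_size : Int) (out : List (List Int)) : Decidable (Spec_create_matrix_operation_order matrix_size out) := by unfold Spec_create_matrix_operation_order; infer_instance

-- ===== CLAIM (what is proved, stated in full; the proofs are below) =====
def Claim_equal_create_matrix_operation_order : Prop := ∀ (matrix_size : Int), Dom_create_matrix_operation_order matrix_size → Spec_create_matrix_operation_order matrix_size (create_matrix_operation_order matrix_size)

-- ===== LEMMAS AND PROOFS =====

-- The i-th row of the intended output.
def pvRow (n i : Int) : List Int :=
  i :: (PySem.List.pyRange 0 i 1 ++ PySem.List.pyRange (i + 1) n 1)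

-- ---- A's side ----

-- From index 1 on, A's inner loop only appends the j's different from i.
theorem pv_inner_tail (i a b : Int) (ha : 1 ≤ a) (row : List Int) :
    (PySem.List.pyRange a b 1).foldl
      (fun row j => (if j = 0 then row ++ [i] else row) ++ (if j ≠ i then [j] else [])) row
    = row ++ (PySem.List.pyRange a b 1).filter (fun j => j ≠ i) := by
  by_cases hab : a < b
  · rw [PySem.List.pyRange_one_cons hab]
    have h0 : a ≠ (0 : Int) := by omega
    simp only [List.foldl_cons, List.filter_cons, if_neg h0]
    rw [pv_inner_tail i (a + 1) b (by omega)]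
    by_cases hi : a = i
    · simp [hi]
    · simp [hi]
  · rw [PySem.List.pyRange_one_eq_nil (by omega)]
    simp
termination_by (b - a).toNat
decreasing_by omega

-- Filtering j ≠ i out of a range containing i splits it around i.
theorem pv_filter_split (a b i : Int) (hai : a ≤ i) (hib : i < b) :
    (PySem.List.pyRange a b 1).filter (fun j => j ≠ i)
    = PySem.List.pyRange a i 1 ++ PySem.List.pyRange (i + 1) b 1 := by
  rw [PySem.List.pyRange_one_append a i b hai (by omega),
      PySem.List.pyRange_one_append i (i + 1) b (by omega) (by omega),
      PySem.List.pyRange_one_singleton]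
  have h1 : (PySem.List.pyRange a i 1).filter (fun j => j ≠ i) = PySem.List.pyRange a i 1 := by
    apply List.filter_eq_self.mpr
    intro x hx
    have := (PySem.List.mem_pyRange_one).mp hx
    simp; omega
  have h2 : (PySem.List.pyRange (i + 1) b 1).filter (fun j => j ≠ i) = PySem.List.pyRange (i + 1) b 1 := by
    apply List.filter_eq_self.mpr
    intro x hx
    have := (PySem.List.mem_pyRange_one).mp hx
    simp; omega
  simp only [ne_eq, decide_not] at h1 h2
  simp [List.filter_append, h1, h2]

-- A's inner loop over range(n), for 0 ≤ i < n, produces the intended row.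
theorem pv_row_eq (n i : Int) (h0 : 0 ≤ i) (hn : i < n) :
    (PySem.List.pyRange 0 n 1).foldl
      (fun row j => (if j = 0 then row ++ [i] else row) ++ (if j ≠ i then [j] else [])) []
    = pvRow n i := by
  rw [PySem.List.pyRange_one_cons (by omega : (0 : Int) < n)]
  simp only [List.foldl_cons]
  rw [pv_inner_tail i (0 + 1) n (by omega)]
  by_cases hi : i = 0
  · subst hi
    simp only [ne_eq, not_true_eq_false]
    rw [List.filter_eq_self.mpr (by
      intro x hx
      have := (PySem.List.mem_pyRange_one).mp hx
      simp; omega)]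
    rw [pvRow, PySem.List.pyRange_one_eq_nil (le_refl 0)]
    simp
  · have : (0 : Int) ≠ i := fun h => hi h.symm
    rw [pv_filter_split (0 + 1) n i (by omega) hn]
    simp only [pvRow]
    rw [PySem.List.pyRange_one_cons (by omega : (0 : Int) < i)]
    simp [this]

-- The outer accumulate-by-append loop is a map.
theorem pv_foldl_append_map (g : Int → List Int) (xs : List Int) (acc : List (List Int)) :
    xs.foldl (fun om i => om ++ [g i]) acc = acc ++ xs.map g := by
  induction xs generalizing acc with
  | nil => simp
  | cons x xs ih => simp [List.foldl_cons, ih]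

theorem pv_A_eq_map (n : Int) :
    create_matrix_operation_order n = (PySem.List.pyRange 0 n 1).map (pvRow n) := by
  unfold create_matrix_operation_order
  rw [pv_foldl_append_map]
  simp only [List.nil_append]
  apply List.map_congr_left
  intro i hi
  have hmem := (PySem.List.mem_pyRange_one).mp hi
  exact pv_row_eq n i hmem.1 hmem.2

-- ---- B's side ----

-- The swap row[0] <-> row[i+1] turns row i into row i+1.
theorem pv_swap_step (n i : Int) (h0 : 0 ≤ i) (hn : i + 1 < n) :
    ((pvRow n i).set 0 ((pvRow n i).getD (i + 1).toNat 0)).set (i + 1).toNat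
        ((pvRow n i).getD 0 0)
    = pvRow n (i + 1) := by
  have hlen : (PySem.List.pyRange 0 i 1).length = i.toNat := by
    simp [PySem.List.length_pyRange_one 0 i]
  have htoNat : (i + 1).toNat = i.toNat + 1 := by omega
  have hcons := PySem.List.pyRange_one_cons (a := i + 1) (b := n) (by omega : i + 1 < n)
  rw [show i + 1 + 1 = i + 2 from by ring] at hcons
  have hgetD : (pvRow n i).getD (i + 1).toNat 0 = i + 1 := by
    rw [pvRow, htoNat]
    simp only [List.getD_cons_succ]
    rw [List.getD_append_right _ _ _ _ hlen.le, hlen, Nat.sub_self, hcons]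
    simp
  rw [hgetD, pvRow, htoNat]
  simp only [List.getD_cons_zero, List.set_cons_zero, List.set_cons_succ]
  rw [List.set_append, if_neg (by omega : ¬ i.toNat < (PySem.List.pyRange 0 i 1).length),
      hlen, Nat.sub_self, hcons]
  simp only [List.set_cons_zero]
  rw [pvRow, show i + 1 + 1 = i + 2 from by ring,
      PySem.List.pyRange_one_succ_right (a := 0) (b := i) h0]
  simp

-- Invariant of B's fold: starting at row a with row = pvRow n a, the result is
-- acc followed by the intended rows a..n-1.
theorem pv_fold_inv (n a : Int) (h0 : 0 ≤ a) (han : a < n) (acc : List (List Int)) :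
    ((PySem.List.pyRange a n 1).foldl
      (fun (st : List (List Int) × List Int) i =>
        let result := st.1 ++ [st.2]
        let row :=
          if i + 1 < n then
            let x := st.2.getD 0 0
            let y := st.2.getD (i + 1).toNat 0
            (st.2.set 0 y).set (i + 1).toNat x
          else st.2
        (result, row))
      (acc, pvRow n a)).1
    = acc ++ (PySem.List.pyRange a n 1).map (pvRow n) := by
  rw [PySem.List.pyRange_one_cons han]
  simp only [List.foldl_cons, List.map_cons]
  by_cases h : a + 1 < n
  · rw [if_pos h, pv_swap_step n a h0 h]
    have hrec := pv_fold_inv n (a + 1) (by omega) h (acc ++ [pvRow n a])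
    simp only [List.append_assoc, List.singleton_append] at hrec
    exact hrec
  · rw [if_neg h, PySem.List.pyRange_one_eq_nil (by omega : n ≤ a + 1)]
    simp
termination_by (n - a).toNat
decreasing_by omega

theorem pv_B_eq_map (n : Int) :
    create_matrix_operation_order_alt n = (PySem.List.pyRange 0 n 1).map (pvRow n) := by
  unfold create_matrix_operation_order_alt
  by_cases hn : 0 < n
  · have hinit : pvRow n 0 = PySem.List.pyRange 0 n 1 := by
      rw [pvRow, PySem.List.pyRange_one_eq_nil (le_refl 0), List.nil_append,
          PySem.List.pyRange_one_cons hn]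
    have h2 := pv_fold_inv n 0 (le_refl 0) hn []
    rw [hinit] at h2
    simpa using h2
  · rw [PySem.List.pyRange_one_eq_nil (by omega)]
    simp

-- ===== VERDICT (by name: the statement is the Claim_ definition above) =====
theorem create_matrix_operation_order_spec : Claim_equal_create_matrix_operation_order := by
  intro n _
  unfold Spec_create_matrix_operation_order
  rw [pv_A_eq_map, pv_B_eq_map]
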